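-- pv_equiv track=rewrite | github.com/VCHSRobots/RobotCode2018 | Pathfinding/DotCompare.py | measureObstacles
-- ===== SOURCE A (Python) =====
-- def measureObstacles(distdifs, sensitivity = 1):
--     obstacle = 0
--     obstacles = []
--     for ang in distdifs:
--         distdif = distdifs[ang]
--         if distdif >= sensitivity:
--             obstacle += 1
--         else:
--             obstacle = 0
--         if obstacle:
--             if obstacle == 1:
--                 obstacles.append([ang])
--             else:
--                 obstacles[-1].append(ang)
--     return obstacles
-- ===== SOURCE B (Python) =====
-- def measureObstacles(distdifs, sensitivity = 1):
--     keys = list(distdifs)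
--     out = []
--     i, n = 0, len(keys)
--     while i < n:
--         if distdifs[keys[i]] >= sensitivity:
--             j = i + 1
--             while j < n and distdifs[keys[j]] >= sensitivity:
--                 j += 1
--             out.append(keys[i:j])
--             i = j
--         else:
--             i += 1
--     return out
-- ===== Notes on version B (the rewrite author's own statement) =====
-- stated objective: alternative
-- what changed: Replaces the stateful single loop that maintains a run counter and mutates the last group in place with a two-pointer scan that finds each hot run's end and emits the whole run as one slice.
import Mathlib
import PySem

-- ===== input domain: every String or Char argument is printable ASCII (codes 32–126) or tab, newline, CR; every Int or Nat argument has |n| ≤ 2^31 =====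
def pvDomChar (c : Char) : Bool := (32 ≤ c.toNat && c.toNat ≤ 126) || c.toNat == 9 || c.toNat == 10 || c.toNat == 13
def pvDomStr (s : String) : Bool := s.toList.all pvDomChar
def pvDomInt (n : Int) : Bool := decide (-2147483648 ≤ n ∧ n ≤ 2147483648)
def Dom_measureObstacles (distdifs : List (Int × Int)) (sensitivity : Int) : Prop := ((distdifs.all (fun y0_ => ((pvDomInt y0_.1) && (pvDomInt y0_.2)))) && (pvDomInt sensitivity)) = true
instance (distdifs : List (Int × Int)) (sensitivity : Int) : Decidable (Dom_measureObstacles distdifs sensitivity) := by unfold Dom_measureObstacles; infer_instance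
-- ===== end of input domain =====

-- B replaces A's stateful counter/append-to-last loop with a two-pointer run scan (alternative decomposition, same cost).


-- ===== PORT A =====
-- obstacles[-1].append(ang): append to the last group ([] case is unreachable, Python would raise IndexError)
def pvAppendLast : List (List Int) → Int → List (List Int)
  | [], _ => []
  | [g], a => [g ++ [a]]
  | g :: gs, a => g :: pvAppendLast gs a

-- the loop body of A (state = (obstacle, obstacles); look ang = distdifs[ang], never the default since ang is a key)
def pvStep (sensitivity : Int) (look : Int → Int) (st : Int × List (List Int)) (ang : Int) :
    Int × List (List Int) :=
  let distdif := look ang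
  let obstacle := if distdif ≥ sensitivity then st.1 + 1 else 0
  if obstacle ≠ 0 then
    if obstacle == 1 then (obstacle, st.2 ++ [[ang]])
    else (obstacle, pvAppendLast st.2 ang)
  else (obstacle, st.2)

def measureObstacles (distdifs : List (Int × Int)) (sensitivity : Int) : List (List Int) :=
  let d := PySem.Dict.ofList distdifs          -- the dict[int,int] argument, Python construction order
  (d.keys.foldl (pvStep sensitivity (fun ang => (PySem.Dict.get? d ang).getD 0)) (0, [])).2

-- ===== PORT B =====
-- the two-pointer scan of Source B: at a hot key, advance j over the whole hot run and emit keys[i:j]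
def pvRuns (hot : Int → Bool) : List Int → List (List Int)
  | [] => []
  | k :: rest =>
    if hot k then (k :: rest.takeWhile hot) :: pvRuns hot (rest.dropWhile hot)
    else pvRuns hot rest
termination_by ks => ks.length
decreasing_by
  · simpa using Nat.lt_succ_of_le (List.length_dropWhile_le hot rest)
  · simp

def measureObstacles_alt (distdifs : List (Int × Int)) (sensitivity : Int) : List (List Int) :=
  let d := PySem.Dict.ofList distdifs
  pvRuns (fun k => (PySem.Dict.get? d k).getD 0 ≥ sensitivity) d.keys

-- ===== PRECONDITION & SPEC =====
def Spec_measureObstacles (distdifs : List (Int × Int)) (sensitivity : Int) (out : List (List Int)) : Prop := out = measureObstacles_alt distdifs sensitivity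
instance (distdifs : List (Int × Int)) (sensitivity : Int) (out : List (List Int)) : Decidable (Spec_measureObstacles distdifs sensitivity out) := by unfold Spec_measureObstacles; infer_instance

-- ===== CLAIM (what is proved, stated in full; the proofs are below) =====
def Claim_equal_measureObstacles : Prop := ∀ (distdifs : List (Int × Int)) (sensitivity : Int), Dom_measureObstacles distdifs sensitivity → Spec_measureObstacles distdifs sensitivity (measureObstacles distdifs sensitivity)

-- ===== LEMMAS AND PROOFS =====

theorem pvAppendLast_concat (init : List (List Int)) (g : List Int) (a : Int) :
    pvAppendLast (init ++ [g]) a = init ++ [g ++ [a]] := by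
  induction init with
  | nil => rfl
  | cons h t ih =>
    cases t with
    | nil => simp [pvAppendLast]
    | cons h' t' => simpa [pvAppendLast] using ih

theorem pvFold_invariant (sensitivity : Int) (look : Int → Int)
    (hot : Int → Bool) (hhot : ∀ k, hot k = decide (look k ≥ sensitivity)) :
    ∀ ks : List Int,
      (∀ acc : List (List Int),
        (ks.foldl (pvStep sensitivity look) (0, acc)).2 = acc ++ pvRuns hot ks) ∧
      (∀ (init : List (List Int)) (g : List Int) (c : Int), 1 ≤ c →
        (ks.foldl (pvStep sensitivity look) (c, init ++ [g])).2
          = init ++ (g ++ ks.takeWhile hot) :: pvRuns hot (ks.dropWhile hot)) := by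
  intro ks
  induction ks with
  | nil => exact ⟨fun acc => by simp [pvRuns], fun init g c hc => by simp [pvRuns]⟩
  | cons k rest ih =>
    constructor
    · intro acc
      by_cases hk : look k ≥ sensitivity
      · have hstep : pvStep sensitivity look (0, acc) k = (1, acc ++ [[k]]) := by
          simp [pvStep, hk]
        rw [List.foldl_cons, hstep, ih.2 acc [k] 1 le_rfl]
        rw [pvRuns]
        simp [hhot, hk]
      · have hstep : pvStep sensitivity look (0, acc) k = (0, acc) := by
          simp [pvStep, hk]
        rw [List.foldl_cons, hstep, ih.1 acc]
        rw [pvRuns]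
        simp [hhot, hk]
    · intro init g c hc
      by_cases hk : look k ≥ sensitivity
      · have hc1 : c + 1 ≠ 0 := by omega
        have hc2 : (c + 1 == (1 : Int)) = false := by
          simp only [beq_eq_false_iff_ne]; omega
        have hstep : pvStep sensitivity look (c, init ++ [g]) k
            = (c + 1, init ++ [g ++ [k]]) := by
          simp [pvStep, hk, hc1, hc2, pvAppendLast_concat]
        rw [List.foldl_cons, hstep, ih.2 init (g ++ [k]) (c + 1) (by omega)]
        have : hot k = true := by simp [hhot, hk]
        simp [this]
      · have hstep : pvStep sensitivity look (c, init ++ [g]) k = (0, init ++ [g]) := by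
          simp [pvStep, hk]
        have : hot k = false := by simp [hhot, hk]
        rw [List.foldl_cons, hstep, ih.1 (init ++ [g])]
        rw [List.takeWhile_cons, List.dropWhile_cons]
        simp only [this, Bool.false_eq_true, if_neg (by simp : ¬False)]
        rw [pvRuns]
        simp [this]

-- ===== VERDICT (by name: the statement is the Claim_ definition above) =====
theorem measureObstacles_spec : Claim_equal_measureObstacles := by
  intro distdifs sensitivity _
  unfold Spec_measureObstacles measureObstacles measureObstacles_alt
  set d := PySem.Dict.ofList distdifs with hd
  have h := (pvFold_invariant sensitivity (fun k => (PySem.Dict.get? d k).getD 0)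
      (fun k => decide ((PySem.Dict.get? d k).getD 0 ≥ sensitivity)) (fun k => rfl) d.keys).1 []
  exact h
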